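-- pv_equiv track=rewrite | github.com/omareldalil25/OD_Signs_learning | components.py | detected_word
-- ===== SOURCE A (Python) =====
-- def detected_word(WORD, detected_index):
--     markdown_str = f'<div style="font-weight: bold; text-align: center; font-size: 50px;">'
--     # Loop through each letter in the word
--     for i, letter in enumerate(WORD):
--         # Check if the current letter index is less than or equal to the detected index
--         if i <= detected_index:
--             # If yes, add the letter in green color
--             markdown_str += f'<span style="color:#ffe090;">{letter}</span>'
--         else:
--             # If no, add the letter in white color
--             markdown_str += f'<span style="color:white;">{letter}</span>'
--     markdown_str += "</div>"
--     return markdown_str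
-- ===== SOURCE B (Python) =====
-- def detected_word(WORD, detected_index):
--     cut = max(0, detected_index + 1)
--     head, tail = WORD[:cut], WORD[cut:]
--     green = "".join(f'<span style="color:#ffe090;">{c}</span>' for c in head)
--     white = "".join(f'<span style="color:white;">{c}</span>' for c in tail)
--     return ('<div style="font-weight: bold; text-align: center; font-size: 50px;">'
--             + green + white + "</div>")
-- ===== Notes on version B (the rewrite author's own statement) =====
-- stated objective: simpler
-- what changed: Replaces the per-letter index comparison inside one accumulating loop by precomputing the clamped boundary cut = max(0, detected_index+1), slicing the word into head/tail, and joining two comprehensions (green spans then white spans).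
import Mathlib
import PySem

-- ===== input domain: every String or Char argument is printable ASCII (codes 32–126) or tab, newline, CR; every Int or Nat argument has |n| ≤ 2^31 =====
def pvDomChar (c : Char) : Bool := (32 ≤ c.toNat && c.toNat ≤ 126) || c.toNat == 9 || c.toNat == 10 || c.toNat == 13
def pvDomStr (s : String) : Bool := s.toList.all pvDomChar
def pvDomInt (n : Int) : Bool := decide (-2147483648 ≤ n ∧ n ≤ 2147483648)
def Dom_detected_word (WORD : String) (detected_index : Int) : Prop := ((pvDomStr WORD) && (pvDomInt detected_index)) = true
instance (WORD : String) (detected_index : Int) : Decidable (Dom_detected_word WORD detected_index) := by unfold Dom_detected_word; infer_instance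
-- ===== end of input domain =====

-- B precomputes the clamped cut index and joins two mapped slices instead of branching per letter inside one accumulating loop (objective: simpler).
-- ===== PORT A =====
def pvDivOpen : List Char := "<div style=\"font-weight: bold; text-align: center; font-size: 50px;\">".toList
def pvSpanGreen (c : Char) : List Char := "<span style=\"color:#ffe090;\">".toList ++ [c] ++ "</span>".toList
def pvSpanWhite (c : Char) : List Char := "<span style=\"color:white;\">".toList ++ [c] ++ "</span>".toList

def detected_word (WORD : String) (detected_index : Int) : String :=
  let md := (PySem.List.enumerate WORD.toList 0).foldl
    (fun acc (p : Int × Char) =>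
      if p.1 ≤ detected_index then acc ++ pvSpanGreen p.2 else acc ++ pvSpanWhite p.2)
    pvDivOpen
  String.ofList (md ++ "</div>".toList)

-- ===== PORT B =====
def detected_word_alt (WORD : String) (detected_index : Int) : String :=
  let cut : Int := max 0 (detected_index + 1)
  let head := PySem.List.slice WORD.toList none (some cut)
  let tail := PySem.List.slice WORD.toList (some cut) none
  String.ofList (pvDivOpen ++ (head.map pvSpanGreen).flatten
    ++ (tail.map pvSpanWhite).flatten ++ "</div>".toList)

-- ===== PRECONDITION & SPEC =====
def Spec_detected_word (WORD : String) (detected_index : Int) (out : String) : Prop := out = detected_word_alt WORD detected_index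
instance (WORD : String) (detected_index : Int) (out : String) : Decidable (Spec_detected_word WORD detected_index out) := by unfold Spec_detected_word; infer_instance

-- ===== CLAIM (what is proved, stated in full; the proofs are below) =====
def Claim_equal_detected_word : Prop := ∀ (WORD : String) (detected_index : Int), Dom_detected_word WORD detected_index → Spec_detected_word WORD detected_index (detected_word WORD detected_index)

-- ===== LEMMAS AND PROOFS =====

-- ===== VERDICT (by name: the statement is the Claim_ definition above) =====
theorem pv_fold_split (di : Int) :
    ∀ (xs : List Char) (i : Int) (acc : List Char),
      (PySem.List.enumerate xs i).foldl
        (fun acc (p : Int × Char) =>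
          if p.1 ≤ di then acc ++ pvSpanGreen p.2 else acc ++ pvSpanWhite p.2) acc
      = acc ++ ((xs.take (max 0 (di + 1 - i)).toNat).map pvSpanGreen).flatten
            ++ ((xs.drop (max 0 (di + 1 - i)).toNat).map pvSpanWhite).flatten := by
  intro xs
  induction xs with
  | nil => intro i acc; simp [PySem.List.enumerate]
  | cons x xs ih =>
    intro i acc
    rw [PySem.List.enumerate_cons, List.foldl_cons, ih (i + 1)]
    by_cases h : i ≤ di
    · have hk : (max 0 (di + 1 - i)).toNat = (max 0 (di + 1 - (i + 1))).toNat + 1 := by omega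
      simp [h, hk, List.append_assoc]
    · have hk : (max 0 (di + 1 - i)).toNat = 0 := by omega
      have hk' : (max 0 (di - i)).toNat = 0 := by omega
      simp [h, hk, hk', List.append_assoc]

theorem detected_word_spec : Claim_equal_detected_word := by
  intro WORD di _
  unfold Spec_detected_word detected_word detected_word_alt
  have hcut : (0 : Int) ≤ max 0 (di + 1) := le_max_left _ _
  rw [pv_fold_split di WORD.toList 0]
  simp [PySem.List.slice_to _ hcut, PySem.List.slice_from _ hcut, List.append_assoc]
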